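-- pv_equiv track=rewrite | github.com/davidichalfyorov-wq/sct-theory | analysis/scripts/fund_combined_dr.py | molien_su2_series
-- ===== SOURCE A (Python) =====
-- def molien_su2_series(n_max: int) -> list[int]:
--     """Compute coefficients of M(t) = (1 + t^6) / ((1-t^2)(1-t^3)(1-t^4)).
--
--     This is the Molien series for SU(2) acting on the 5-dimensional
--     traceless symmetric tensor representation (j=2), which is the
--     representation governing the self-dual part of the Weyl tensor.
--
--     Method: polynomial long division via explicit power series arithmetic.
--     We compute the power series of the denominator (1-t^2)(1-t^3)(1-t^4)
--     and then divide (1+t^6) by it.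
--     """
--     # Build the denominator power series up to degree n_max
--     # Start with 1
--     denom = [0] * (n_max + 1)
--     denom[0] = 1
--
--     # Multiply by 1/(1-t^2) = 1 + t^2 + t^4 + ...
--     temp = [0] * (n_max + 1)
--     for i in range(n_max + 1):
--         for j in range(0, n_max + 1 - i, 2):
--             temp[i + j] += denom[i]
--     denom = temp
--
--     # Multiply by 1/(1-t^3) = 1 + t^3 + t^6 + ...
--     temp = [0] * (n_max + 1)
--     for i in range(n_max + 1):
--         if denom[i] == 0:
--             continue
--         for j in range(0, n_max + 1 - i, 3):
--             temp[i + j] += denom[i]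
--     denom = temp
--
--     # Multiply by 1/(1-t^4) = 1 + t^4 + t^8 + ...
--     temp = [0] * (n_max + 1)
--     for i in range(n_max + 1):
--         if denom[i] == 0:
--             continue
--         for j in range(0, n_max + 1 - i, 4):
--             temp[i + j] += denom[i]
--     denom = temp
--
--     # Now denom[n] = coefficient of t^n in 1/((1-t^2)(1-t^3)(1-t^4))
--     # Multiply by numerator (1 + t^6):
--     # M(t) = denom(t) + t^6 * denom(t)
--     M = [0] * (n_max + 1)
--     for i in range(n_max + 1):
--         M[i] += denom[i]
--         if i >= 6:
--             M[i] += denom[i - 6]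
--
--     return M
-- ===== SOURCE B (Python) =====
-- def molien_su2_series(n_max: int) -> list[int]:
--     """Coefficients of (1 + t^6) / ((1-t^2)(1-t^3)(1-t^4)) up to degree n_max.
--
--     Each factor 1/(1-t^k) is applied as the in-place recurrence
--     out[i] += out[i-k], one O(n) pass per factor, instead of A's
--     quadratic convolution loops.
--     """
--     n = n_max + 1
--     out = [0] * n
--     out[0] = 1
--     for k in (2, 3, 4):
--         for i in range(k, n):
--             out[i] += out[i - k]
--     return [out[i] + (out[i - 6] if i >= 6 else 0) for i in range(n)]
-- ===== Notes on version B (the rewrite author's own statement) =====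
-- stated objective: faster
-- what changed: Each 1/(1-t^k) factor is applied as the in-place O(n) recurrence out[i] += out[i-k] (plus one final comprehension for the numerator) instead of A's O(n^2) convolution loops that add denom[i] at every position i+j*k of a fresh array.
-- outside the precondition, e.g. on molien_su2_series(-1): A raises IndexError, B raises IndexError
import Mathlib
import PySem

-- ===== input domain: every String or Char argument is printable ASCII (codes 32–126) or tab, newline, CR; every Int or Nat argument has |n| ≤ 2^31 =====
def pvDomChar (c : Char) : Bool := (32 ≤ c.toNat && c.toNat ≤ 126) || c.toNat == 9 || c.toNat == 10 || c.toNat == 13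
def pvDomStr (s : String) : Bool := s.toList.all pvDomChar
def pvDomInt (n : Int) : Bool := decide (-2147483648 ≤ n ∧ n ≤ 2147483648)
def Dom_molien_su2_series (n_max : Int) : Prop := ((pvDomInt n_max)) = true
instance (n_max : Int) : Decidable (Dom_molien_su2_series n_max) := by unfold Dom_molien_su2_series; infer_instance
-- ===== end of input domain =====

-- B replaces each of A's quadratic "1/(1-t^k)" convolution loops by the in-place
-- linear recurrence out[i] += out[i-k]; the return values agree for all n_max ≥ 0.

-- ===== PORT A =====
-- one multiplication of the running series d by 1/(1-t^k) (Python pastes this loop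
-- three times; the second and third copy carry the `if denom[i] == 0: continue` guard)
def pvMulInvA (k : Int) (skipZero : Bool) (nmax : Int) (d : List Int) : List Int :=
  (PySem.List.pyRange 0 (nmax + 1) 1).foldl
    (fun temp i =>
      if skipZero && (d.getD i.toNat 0 == 0) then temp
      else
        (PySem.List.pyRange 0 (nmax + 1 - i) k).foldl
          (fun temp j => temp.modify (i + j).toNat (· + d.getD i.toNat 0)) temp)
    (List.replicate (nmax + 1).toNat 0)

def molien_su2_series (n_max : Int) : List Int :=
  let denom := (List.replicate (n_max + 1).toNat 0).set 0 1
  let denom := pvMulInvA 2 false n_max denom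
  let denom := pvMulInvA 3 true n_max denom
  let denom := pvMulInvA 4 true n_max denom
  (PySem.List.pyRange 0 (n_max + 1) 1).foldl
    (fun M i =>
      let M := M.modify i.toNat (· + denom.getD i.toNat 0)
      if 6 ≤ i then M.modify i.toNat (· + denom.getD (i - 6).toNat 0) else M)
    (List.replicate (n_max + 1).toNat 0)

-- ===== PORT B =====
-- one in-place recurrence pass: for i in range(k, n): out[i] += out[i - k]
def pvStepB (k n : Int) (out : List Int) : List Int :=
  (PySem.List.pyRange k n 1).foldl
    (fun out i => out.modify i.toNat (· + out.getD (i - k).toNat 0)) out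

def molien_su2_series_alt (n_max : Int) : List Int :=
  let n := n_max + 1
  let out := (List.replicate n.toNat 0).set 0 1
  let out := ([2, 3, 4] : List Int).foldl (fun out k => pvStepB k n out) out
  (PySem.List.pyRange 0 n 1).map
    (fun i => out.getD i.toNat 0 + if 6 ≤ i then out.getD (i - 6).toNat 0 else 0)

-- ===== PRECONDITION & SPEC =====
-- Pre_ excludes negative n_max, on which the Python A raises IndexError (assigning the leading coefficient into an empty list).
def Pre_molien_su2_series (n_max : Int) : Prop := 0 ≤ n_max
instance (n_max : Int) : Decidable (Pre_molien_su2_series n_max) := by unfold Pre_molien_su2_series; infer_instance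
def pvWitness_molien_su2_series : Int := 6

def Spec_molien_su2_series (n_max : Int) (out : List Int) : Prop := out = molien_su2_series_alt n_max
instance (n_max : Int) (out : List Int) : Decidable (Spec_molien_su2_series n_max out) := by unfold Spec_molien_su2_series; infer_instance

-- ===== CLAIM (what is proved, stated in full; the proofs are below) =====
def Claim_equal_molien_su2_series : Prop := ∀ (n_max : Int), Dom_molien_su2_series n_max → Pre_molien_su2_series n_max → Spec_molien_su2_series n_max (molien_su2_series n_max)

-- ===== LEMMAS AND PROOFS =====

theorem pv_getD_modify (l : List Int) (p : Nat) (f : Int → Int) (m : Nat) :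
    (l.modify p f).getD m 0 = if p = m ∧ m < l.length then f (l.getD m 0) else l.getD m 0 := by
  rcases Nat.lt_or_ge m l.length with h | h
  · by_cases hpm : p = m
    · simp [List.getD_eq_getElem?_getD, hpm, h]
    · simp [List.getD_eq_getElem?_getD, hpm]
  · have hg : l[m]? = none := List.getElem?_eq_none h
    have : ¬ (p = m ∧ m < l.length) := by omega
    simp [List.getD_eq_getElem?_getD, List.getElem?_modify, hg, this]

theorem pv_foldl_modify_length {ι : Type} (l : List ι) (p : ι → Nat)
    (f : ι → List Int → Int → Int) (acc : List Int) :
    (l.foldl (fun t j => t.modify (p j) (f j t)) acc).length = acc.length := by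
  induction l generalizing acc with
  | nil => rfl
  | cons x xs ih => simp [List.foldl_cons, ih, List.length_modify]

theorem pv_foldl_preserve {ι : Type} (l : List ι) (f : List Int → ι → List Int)
    (h : ∀ acc x, (f acc x).length = acc.length) (acc : List Int) :
    (l.foldl f acc).length = acc.length := by
  induction l generalizing acc with
  | nil => rfl
  | cons x xs ih => rw [List.foldl_cons, ih, h]

theorem pv_cnt_iff {L k : Int} (hL : 0 < L) (hk : 0 < k) (t : Nat) :
    t < ((L + k - 1) / k).toNat ↔ k * (t : Int) < L := by
  have hq : (0 : Int) ≤ (L + k - 1) / k := Int.ediv_nonneg (by omega) (by omega)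
  rw [show (t < ((L + k - 1) / k).toNat ↔ (t : Int) < (L + k - 1) / k) from by omega]
  rw [show ((t : Int) < (L + k - 1) / k ↔ (t : Int) + 1 ≤ (L + k - 1) / k) from by omega]
  rw [Int.le_ediv_iff_mul_le hk]
  constructor <;> intro h <;> nlinarith

theorem pv_innerA_getD (k i c : Int) (hk : 0 < k) (hi : 0 ≤ i) (cnt : Nat) (temp : List Int)
    (hidx : ∀ t : Nat, t < cnt → i + k * (t : Int) < (temp.length : Int)) (m : Nat) :
    ((List.range cnt).foldl (fun tmp t => tmp.modify (i + (0 + k * (t : Int))).toNat (· + c)) temp).getD m 0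
      = temp.getD m 0 + (if ∃ t < cnt, (m : Int) = i + k * t then c else 0) := by
  induction cnt with
  | zero => simp
  | succ n ih =>
    have hidx' : ∀ t : Nat, t < n → i + k * (t : Int) < (temp.length : Int) :=
      fun t ht => hidx t (by omega)
    rw [List.range_succ, List.foldl_append, List.foldl_cons, List.foldl_nil]
    set r := (List.range n).foldl (fun tmp t => tmp.modify (i + (0 + k * (t : Int))).toNat (· + c)) temp with hr
    have hlen : r.length = temp.length := by
      rw [hr]
      exact pv_foldl_modify_length _ (fun (t : Nat) => (i + (0 + k * (t : Int))).toNat) (fun _ _ x => x + c) temp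
    rw [pv_getD_modify, ih hidx']
    have hK0 : 0 ≤ i + k * (n : Int) := add_nonneg hi (mul_nonneg hk.le (Int.natCast_nonneg n))
    have hKlt : i + k * (n : Int) < (temp.length : Int) := hidx n (Nat.lt_succ_self n)
    by_cases hm' : (m : Int) = i + k * (n : Int)
    · have htn : (i + (0 + k * (n : Int))).toNat = m := by
        rw [show i + (0 + k * (n:Int)) = i + k * n by ring, ← hm', Int.toNat_natCast]
      have hmlt : m < temp.length := by exact_mod_cast hm' ▸ hKlt
      have hCold : ¬ ∃ t, t < n ∧ (m : Int) = i + k * t := by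
        rintro ⟨t, ht, he⟩
        have h2 : k * (t : Int) = k * (n : Int) := by linarith [he, hm']
        have ht' : (t : Int) = (n : Int) := mul_left_cancel₀ (ne_of_gt hk) h2
        have : t = n := by exact_mod_cast ht'
        omega
      have hCnew : ∃ t, t < n + 1 ∧ (m : Int) = i + k * t := ⟨n, Nat.lt_succ_self n, hm'⟩
      rw [if_pos ⟨htn, by omega⟩, if_pos hCnew, if_neg hCold]
      ring
    · have hne : ¬ ((i + (0 + k * (n : Int))).toNat = m ∧ m < r.length) := by
        rintro ⟨he, _⟩
        apply hm'
        rw [← he, Int.toNat_of_nonneg (by linarith [hK0])]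
        ring
      have hiff : (∃ t, t < n + 1 ∧ (m : Int) = i + k * t) ↔ (∃ t, t < n ∧ (m : Int) = i + k * t) := by
        constructor
        · rintro ⟨t, ht, he⟩
          rcases Nat.lt_or_ge t n with h | h
          · exact ⟨t, h, he⟩
          · exfalso; apply hm'; rw [he, show t = n by omega]
        · rintro ⟨t, ht, he⟩; exact ⟨t, by omega, he⟩
      rw [if_neg hne]
      simp only [hiff]

def Sf (k : Nat) (d : List Int) : Nat → Int
  | m => if _h : 0 < k ∧ k ≤ m then d.getD m 0 + Sf k d (m - k) else d.getD m 0
  termination_by m => m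
  decreasing_by omega

theorem Sf_lt {k : Nat} (d : List Int) {m : Nat} (h : m < k) : Sf k d m = d.getD m 0 := by
  rw [Sf]; rw [dif_neg]; omega

theorem Sf_ge {k : Nat} (d : List Int) {m : Nat} (h0 : 0 < k) (h : k ≤ m) :
    Sf k d m = d.getD m 0 + Sf k d (m - k) := by
  rw [Sf]; rw [dif_pos ⟨h0, h⟩]

theorem pv_mulInvA_aux (kn : Nat) (hk : 0 < kn) (skip : Bool) (n_max : Int) (h0 : 0 ≤ n_max)
    (d : List Int) (p : Nat) (hp : (p : Int) ≤ n_max + 1) (m : Nat)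
    (hm : m < (n_max + 1).toNat) :
    ((PySem.List.pyRange 0 (p : Int) 1).foldl
        (fun temp i =>
          if skip && (d.getD i.toNat 0 == 0) then temp
          else (PySem.List.pyRange 0 (n_max + 1 - i) (kn : Int)).foldl
              (fun temp j => temp.modify (i + j).toNat (· + d.getD i.toNat 0)) temp)
        (List.replicate (n_max + 1).toNat 0)).getD m 0
      = ∑ i ∈ Finset.range p, (if i ≤ m ∧ (kn : Int) ∣ ((m : Int) - i) then d.getD i 0 else 0) := by
  have hkz : (0 : Int) < (kn : Int) := by exact_mod_cast hk
  induction p with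
  | zero => simp [PySem.List.pyRange_one_eq_nil (le_refl (0 : Int)), List.getD_eq_getElem?_getD]
  | succ p ih =>
    have hp' : (p : Int) ≤ n_max + 1 := by push_cast at hp ⊢; omega
    have hplt : (p : Int) < n_max + 1 := by push_cast at hp; omega
    have hstep : (PySem.List.pyRange 0 ((p : Nat) + 1 : Nat) 1)
        = PySem.List.pyRange 0 (p : Int) 1 ++ [(p : Int)] := by
      push_cast
      exact PySem.List.pyRange_one_succ_right (by omega)
    rw [hstep, List.foldl_append, List.foldl_cons, List.foldl_nil]
    set T := (PySem.List.pyRange 0 (p : Int) 1).foldl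
        (fun temp i =>
          if skip && (d.getD i.toNat 0 == 0) then temp
          else (PySem.List.pyRange 0 (n_max + 1 - i) (kn : Int)).foldl
              (fun temp j => temp.modify (i + j).toNat (· + d.getD i.toNat 0)) temp)
        (List.replicate (n_max + 1).toNat 0) with hT
    have hTlen : T.length = (n_max + 1).toNat := by
      rw [hT]
      rw [pv_foldl_preserve _ _ ?_ _]
      · exact List.length_replicate
      · intro acc x
        split
        · rfl
        · exact pv_foldl_modify_length _ (fun j => (x + j).toNat) (fun j _ v => v + d.getD x.toNat 0) acc
    rw [Finset.sum_range_succ, ← ih hp']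
    by_cases hguard : (skip && (d.getD ((p : Int)).toNat 0 == 0)) = true
    · -- row skipped; its term is 0 because d[p] = 0
      rw [if_pos hguard]
      have hdz : d.getD p 0 = 0 := by
        simp only [Bool.and_eq_true, beq_iff_eq, Int.toNat_natCast] at hguard
        exact hguard.2
      have : (if p ≤ m ∧ (kn : Int) ∣ ((m : Int) - p) then d.getD p 0 else 0) = 0 := by
        rw [hdz]; split <;> rfl
      rw [this, add_zero]
    · rw [if_neg hguard]
      have hL : (0 : Int) < n_max + 1 - (p : Int) := by omega
      rw [PySem.List.pyRange_of_pos 0 (n_max + 1 - (p : Int)) hkz, if_pos (by omega : (0:Int) < n_max + 1 - (p:Int)), List.foldl_map]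
      have hnorm : ((p : Int)).toNat = p := Int.toNat_natCast p
      rw [hnorm]
      have hidx : ∀ t : Nat, t < ((n_max + 1 - (p : Int) - 0 + (kn : Int) - 1) / (kn : Int)).toNat →
          (p : Int) + (kn : Int) * (t : Int) < (T.length : Int) := by
        intro t ht
        have h1 : (kn : Int) * (t : Int) < n_max + 1 - (p : Int) := by
          have := (pv_cnt_iff hL hkz t).mp (by convert ht using 3; ring)
          exact this
        rw [hTlen]
        rw [Int.toNat_of_nonneg (by omega)]
        omega
      rw [pv_innerA_getD (kn : Int) (p : Int) (d.getD p 0) hkz (by positivity) _ T hidx m]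
      congr 1
      have hcond : (∃ t, t < ((n_max + 1 - (p : Int) - 0 + (kn : Int) - 1) / (kn : Int)).toNat ∧
            (m : Int) = (p : Int) + (kn : Int) * (t : Int))
          ↔ (p ≤ m ∧ (kn : Int) ∣ ((m : Int) - (p : Int))) := by
        constructor
        · rintro ⟨t, ht, he⟩
          have htn : (0 : Int) ≤ (kn : Int) * (t : Int) := by positivity
          constructor
          · exact_mod_cast (by omega : (p : Int) ≤ (m : Int))
          · exact ⟨t, by omega⟩
        · rintro ⟨hle, q, hq⟩
          have hq0 : 0 ≤ q := by nlinarith [hq, (by exact_mod_cast hle : (p:Int) ≤ (m:Int))]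
          refine ⟨q.toNat, ?_, ?_⟩
          · rw [show (n_max + 1 - (p : Int) - 0 + (kn : Int) - 1) = (n_max + 1 - (p:Int)) + (kn:Int) - 1 by ring]
            rw [pv_cnt_iff hL hkz q.toNat]
            rw [Int.toNat_of_nonneg hq0]
            have hmlt : (m : Int) < n_max + 1 := by omega
            linarith [hq]
          · rw [Int.toNat_of_nonneg hq0]; linarith [hq]
      rw [if_congr hcond rfl rfl]

theorem pv_G_eq_Sf (kn : Nat) (hk : 0 < kn) (d : List Int) :
    ∀ m : Nat, (∑ i ∈ Finset.range (m + 1),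
        (if i ≤ m ∧ (kn : Int) ∣ ((m : Int) - i) then d.getD i 0 else 0)) = Sf kn d m := by
  intro m
  induction m using Nat.strong_induction_on with
  | _ m ih =>
    by_cases hmk : m < kn
    · rw [Sf_lt d hmk]
      rw [Finset.sum_eq_single_of_mem m (Finset.self_mem_range_succ m)]
      · rw [if_pos ⟨le_refl m, by simp⟩]
      · intro i hi hne
        rw [if_neg]
        rintro ⟨hle, hdvd⟩
        have hilt : i < m := by
          have := Finset.mem_range.mp hi; omega
        have h1 : (kn : Int) ≤ (m : Int) - i := Int.le_of_dvd (by omega) hdvd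
        omega
    · have hmk' : kn ≤ m := by omega
      rw [Sf_ge d hk hmk']
      have hsplit : Finset.range (m + 1) = Finset.Ico 0 (m + 1) := (Finset.range_eq_Ico).symm ▸ rfl
      rw [Finset.range_eq_Ico, ← Finset.sum_Ico_consecutive _ (by omega : 0 ≤ m - kn + 1) (by omega : m - kn + 1 ≤ m + 1)]
      have hfirst : (∑ i ∈ Finset.Ico 0 (m - kn + 1),
          (if i ≤ m ∧ (kn : Int) ∣ ((m : Int) - i) then d.getD i 0 else 0)) = Sf kn d (m - kn) := by
        rw [← Finset.range_eq_Ico, ← ih (m - kn) (by omega)]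
        apply Finset.sum_congr rfl
        intro i hi
        have hile : i ≤ m - kn := by have := Finset.mem_range.mp hi; omega
        have hcast : ((m : Int) - i) = ((((m - kn : Nat)) : Int) - i) + kn := by
          push_cast [Nat.cast_sub hmk']; ring
        have hiff : (i ≤ m ∧ (kn : Int) ∣ ((m : Int) - i)) ↔ (i ≤ m - kn ∧ (kn : Int) ∣ ((((m - kn : Nat)) : Int) - i)) := by
          rw [hcast, dvd_add_self_right]
          constructor
          · rintro ⟨_, h2⟩; exact ⟨hile, h2⟩
          · rintro ⟨_, h2⟩; exact ⟨by omega, h2⟩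
        rw [if_congr hiff rfl rfl]
      have hsecond : (∑ i ∈ Finset.Ico (m - kn + 1) (m + 1),
          (if i ≤ m ∧ (kn : Int) ∣ ((m : Int) - i) then d.getD i 0 else 0)) = d.getD m 0 := by
        rw [Finset.sum_eq_single_of_mem m (Finset.mem_Ico.mpr ⟨by omega, by omega⟩)]
        · rw [if_pos ⟨le_refl m, by simp⟩]
        · intro i hi hne
          rw [if_neg]
          rintro ⟨hle, hdvd⟩
          have hilt : m - kn < i ∧ i < m + 1 := by
            have := Finset.mem_Ico.mp hi; omega
          have h1 : (kn : Int) ≤ (m : Int) - i := Int.le_of_dvd (by omega) hdvd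
          omega
      rw [hfirst, hsecond]
      ring

theorem pv_sum_eq_Sf (kn : Nat) (hk : 0 < kn) (d : List Int) (N m : Nat) (hm : m < N) :
    (∑ i ∈ Finset.range N, (if i ≤ m ∧ (kn : Int) ∣ ((m : Int) - i) then d.getD i 0 else 0))
      = Sf kn d m := by
  rw [← pv_G_eq_Sf kn hk d m]
  have hsub : Finset.range (m + 1) ⊆ Finset.range N := by
    intro x hx
    rw [Finset.mem_range] at hx ⊢
    omega
  refine (Finset.sum_subset hsub ?_).symm
  intro i hiN hinot
  have h2 : m + 1 ≤ i := by
    by_contra hcon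
    exact hinot (Finset.mem_range.mpr (by omega))
  have hcond : ¬ (i ≤ m ∧ (kn : Int) ∣ ((m : Int) - i)) := by
    rintro ⟨hle, _⟩
    omega
  rw [if_neg hcond]

theorem pv_stepB_spec (kn : Nat) (hk : 0 < kn) (d : List Int) (c : Nat) (hc : kn + c ≤ d.length) :
    ((PySem.List.pyRange (kn : Int) ((kn : Int) + (c : Int)) 1).foldl
        (fun out i => out.modify i.toNat (· + out.getD (i - (kn : Int)).toNat 0)) d).length = d.length
    ∧ ∀ m : Nat, m < d.length →
      ((PySem.List.pyRange (kn : Int) ((kn : Int) + (c : Int)) 1).foldl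
          (fun out i => out.modify i.toNat (· + out.getD (i - (kn : Int)).toNat 0)) d).getD m 0
        = if m < kn + c then Sf kn d m else d.getD m 0 := by
  induction c with
  | zero =>
    rw [show ((kn : Int) + ((0 : Nat) : Int)) = (kn : Int) by push_cast; ring]
    rw [PySem.List.pyRange_one_eq_nil (le_refl _)]
    refine ⟨rfl, ?_⟩
    intro m hm
    simp only [List.foldl_nil]
    split
    · exact (Sf_lt d (by omega)).symm
    · rfl
  | succ c ih =>
    obtain ⟨ihlen, ihval⟩ := ih (by omega)
    have hstep : PySem.List.pyRange (kn : Int) ((kn : Int) + ((c + 1 : Nat) : Int)) 1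
        = PySem.List.pyRange (kn : Int) ((kn : Int) + (c : Int)) 1 ++ [(kn : Int) + (c : Int)] := by
      rw [show ((kn : Int) + ((c + 1 : Nat) : Int)) = ((kn : Int) + (c : Int)) + 1 by push_cast; ring]
      exact PySem.List.pyRange_one_succ_right (by omega)
    rw [hstep, List.foldl_append, List.foldl_cons, List.foldl_nil]
    set r := (PySem.List.pyRange (kn : Int) ((kn : Int) + (c : Int)) 1).foldl
        (fun out i => out.modify i.toNat (· + out.getD (i - (kn : Int)).toNat 0)) d with hr
    have htn : ((kn : Int) + (c : Int)).toNat = kn + c := by omega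
    have htn2 : ((kn : Int) + (c : Int) - (kn : Int)).toNat = c := by omega
    refine ⟨by rw [List.length_modify]; exact ihlen, ?_⟩
    intro m hm
    rw [pv_getD_modify, htn, htn2]
    have hrc : r.getD c 0 = Sf kn d c := by
      rw [ihval c (by omega)]
      split
      · rfl
      · exact (Sf_lt d (by omega)).symm
    by_cases hmc : m = kn + c
    · rw [if_pos ⟨hmc.symm, by rw [ihlen]; omega⟩]
      rw [hrc, ihval m hm, if_neg (by omega)]
      subst hmc
      rw [if_pos (show kn + c < kn + (c + 1) from by omega)]
      rw [Sf_ge d hk (show kn ≤ kn + c from by omega)]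
      rw [show kn + c - kn = c from by omega]
    · rw [if_neg (by intro h; exact hmc h.1.symm)]
      rw [ihval m hm]
      by_cases h2 : m < kn + c
      · rw [if_pos h2, if_pos (by omega)]
      · rw [if_neg h2, if_neg (by omega)]

theorem pv_stepB_length (k n : Int) (d : List Int) : (pvStepB k n d).length = d.length := by
  unfold pvStepB
  exact pv_foldl_modify_length _ (fun i : Int => i.toNat) (fun i t x => x + t.getD (i - k).toNat 0) d

theorem pv_mulInvA_length (k : Int) (skip : Bool) (n_max : Int) (d : List Int) :
    (pvMulInvA k skip n_max d).length = (n_max + 1).toNat := by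
  unfold pvMulInvA
  rw [pv_foldl_preserve _ _ ?_ _]
  · exact List.length_replicate
  · intro acc x
    split
    · rfl
    · exact pv_foldl_modify_length _ (fun j : Int => (x + j).toNat) (fun j _ v => v + d.getD x.toNat 0) acc

theorem pv_step_eq (kn : Nat) (hk : 0 < kn) (skip : Bool) (n_max : Int) (h0 : 0 ≤ n_max)
    (d : List Int) (hd : d.length = (n_max + 1).toNat) :
    pvMulInvA (kn : Int) skip n_max d = pvStepB (kn : Int) (n_max + 1) d := by
  have hkz : (0 : Int) < (kn : Int) := by exact_mod_cast hk
  apply List.ext_getElem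
  · rw [pv_mulInvA_length, pv_stepB_length, hd]
  · intro m hmA hmB
    have hm : m < (n_max + 1).toNat := by rw [pv_mulInvA_length] at hmA; exact hmA
    rw [← List.getD_eq_getElem _ 0 hmA, ← List.getD_eq_getElem _ 0 hmB]
    have hA : (pvMulInvA (kn : Int) skip n_max d).getD m 0 = Sf kn d m := by
      unfold pvMulInvA
      rw [show PySem.List.pyRange 0 (n_max + 1) 1
            = PySem.List.pyRange 0 ((((n_max + 1).toNat : Nat)) : Int) 1 from by
          rw [Int.toNat_of_nonneg (by omega)]]
      rw [pv_mulInvA_aux kn hk skip n_max h0 d (n_max + 1).toNat (by omega) m hm]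
      exact pv_sum_eq_Sf kn hk d _ m hm
    have hB : (pvStepB (kn : Int) (n_max + 1) d).getD m 0 = Sf kn d m := by
      unfold pvStepB
      by_cases hkn : kn ≤ (n_max + 1).toNat
      · have hcast : (n_max + 1) = (kn : Int) + (((n_max + 1).toNat - kn : Nat) : Int) := by
          push_cast [Nat.cast_sub hkn]; omega
        rw [hcast]
        rw [(pv_stepB_spec kn hk d ((n_max + 1).toNat - kn) (by omega)).2 m (by omega)]
        rw [if_pos (by omega)]
      · rw [PySem.List.pyRange_one_eq_nil (by omega : n_max + 1 ≤ (kn : Int))]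
        rw [List.foldl_nil]
        exact (Sf_lt d (by omega)).symm
    rw [hA, hB]

theorem pv_finalA_aux (n_max : Int) (_h0 : 0 ≤ n_max) (denom : List Int) (p : Nat)
    (hp : (p : Int) ≤ n_max + 1) (m : Nat) (hm : m < (n_max + 1).toNat) :
    ((PySem.List.pyRange 0 (p : Int) 1).foldl
        (fun M i =>
          if 6 ≤ i then
            (M.modify i.toNat (· + denom.getD i.toNat 0)).modify i.toNat
              (· + denom.getD (i - 6).toNat 0)
          else M.modify i.toNat (· + denom.getD i.toNat 0))
        (List.replicate (n_max + 1).toNat 0)).getD m 0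
      = if m < p then denom.getD m 0 + (if 6 ≤ m then denom.getD (m - 6) 0 else 0) else 0 := by
  induction p with
  | zero =>
    rw [show ((0 : Nat) : Int) = (0 : Int) from by norm_num]
    rw [PySem.List.pyRange_one_eq_nil (le_refl (0 : Int)), List.foldl_nil, if_neg (by omega)]
    simp [List.getD_eq_getElem?_getD]
  | succ p ih =>
    have hp' : (p : Int) ≤ n_max + 1 := by push_cast at hp ⊢; omega
    have hstep : (PySem.List.pyRange 0 ((p + 1 : Nat) : Int) 1)
        = PySem.List.pyRange 0 (p : Int) 1 ++ [(p : Int)] := by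
      push_cast
      exact PySem.List.pyRange_one_succ_right (by positivity)
    rw [hstep, List.foldl_append, List.foldl_cons, List.foldl_nil]
    set T := (PySem.List.pyRange 0 (p : Int) 1).foldl
        (fun M i =>
          if 6 ≤ i then
            (M.modify i.toNat (· + denom.getD i.toNat 0)).modify i.toNat
              (· + denom.getD (i - 6).toNat 0)
          else M.modify i.toNat (· + denom.getD i.toNat 0))
        (List.replicate (n_max + 1).toNat 0) with hT
    have hTlen : T.length = (n_max + 1).toNat := by
      rw [hT]
      rw [pv_foldl_preserve _ _ ?_ _]
      · exact List.length_replicate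
      · intro acc x
        split <;> simp [List.length_modify]
    simp only [Int.toNat_natCast]
    by_cases h6 : (6 : Int) ≤ (p : Int)
    · rw [if_pos h6]
      have h6n : 6 ≤ p := by exact_mod_cast h6
      have htn : ((p : Int) - 6).toNat = p - 6 := by omega
      rw [htn, pv_getD_modify, pv_getD_modify]
      by_cases hmp : m = p
      · subst hmp
        rw [if_pos ⟨rfl, by rw [List.length_modify, hTlen]; omega⟩]
        rw [if_pos ⟨rfl, by rw [hTlen]; omega⟩]
        rw [ih hp', if_neg (show ¬ m < m from by omega),
          if_pos (show m < m + 1 from by omega), if_pos h6n]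
        ring
      · rw [if_neg (by intro h; exact hmp h.1.symm), if_neg (by intro h; exact hmp h.1.symm)]
        rw [ih hp']
        by_cases h2 : m < p
        · rw [if_pos h2, if_pos (show m < p + 1 from by omega)]
        · rw [if_neg h2, if_neg (show ¬ m < p + 1 from by omega)]
    · rw [if_neg h6]
      have h6n : ¬ 6 ≤ p := by
        intro h; exact h6 (by exact_mod_cast h)
      rw [pv_getD_modify]
      by_cases hmp : m = p
      · subst hmp
        rw [if_pos ⟨rfl, by rw [hTlen]; omega⟩]
        rw [ih hp', if_neg (show ¬ m < m from by omega),
          if_pos (show m < m + 1 from by omega), if_neg h6n]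
        ring
      · rw [if_neg (by intro h; exact hmp h.1.symm)]
        rw [ih hp']
        by_cases h2 : m < p
        · rw [if_pos h2, if_pos (show m < p + 1 from by omega)]
        · rw [if_neg h2, if_neg (show ¬ m < p + 1 from by omega)]

theorem pv_final_eq (n_max : Int) (h0 : 0 ≤ n_max) (denom : List Int) :
    ((PySem.List.pyRange 0 (n_max + 1) 1).foldl
        (fun M i =>
          if 6 ≤ i then
            (M.modify i.toNat (· + denom.getD i.toNat 0)).modify i.toNat
              (· + denom.getD (i - 6).toNat 0)
          else M.modify i.toNat (· + denom.getD i.toNat 0))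
        (List.replicate (n_max + 1).toNat 0))
      = (PySem.List.pyRange 0 (n_max + 1) 1).map
          (fun i => denom.getD i.toNat 0 + if 6 ≤ i then denom.getD (i - 6).toNat 0 else 0) := by
  have hrange : PySem.List.pyRange 0 (n_max + 1) 1
      = PySem.List.pyRange 0 ((((n_max + 1).toNat : Nat)) : Int) 1 := by
    rw [Int.toNat_of_nonneg (by omega)]
  have hlenL : ((PySem.List.pyRange 0 (n_max + 1) 1).foldl
        (fun M i =>
          if 6 ≤ i then
            (M.modify i.toNat (· + denom.getD i.toNat 0)).modify i.toNat
              (· + denom.getD (i - 6).toNat 0)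
          else M.modify i.toNat (· + denom.getD i.toNat 0))
        (List.replicate (n_max + 1).toNat 0)).length = (n_max + 1).toNat := by
    rw [pv_foldl_preserve _ _ ?_ _]
    · exact List.length_replicate
    · intro acc x
      split <;> simp [List.length_modify]
  apply List.ext_getElem
  · rw [hlenL, List.length_map, PySem.List.length_pyRange_one]
    omega
  · intro m hmA hmB
    have hm : m < (n_max + 1).toNat := by rw [hlenL] at hmA; exact hmA
    rw [List.getElem_map, PySem.List.getElem_pyRange_one, ← List.getD_eq_getElem _ 0 hmA]
    conv_lhs => rw [hrange]
    rw [pv_finalA_aux n_max h0 denom (n_max + 1).toNat (by omega) m hm]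
    rw [if_pos hm]
    rw [show (0 : Int) + (m : Int) = (m : Int) from by ring, Int.toNat_natCast]
    congr 1
    by_cases h6 : 6 ≤ m
    · rw [if_pos h6, if_pos (by exact_mod_cast h6 : (6:Int) ≤ (m:Int))]
      congr 1
      omega
    · rw [if_neg h6, if_neg (by intro h; exact h6 (by exact_mod_cast h))]

theorem pv_main (n_max : Int) (h0 : 0 ≤ n_max) :
    molien_su2_series n_max = molien_su2_series_alt n_max := by
  have hlen1 : ((List.replicate (n_max + 1).toNat (0 : Int)).set 0 1).length = (n_max + 1).toNat := by
    rw [List.length_set, List.length_replicate]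
  have h2 : pvMulInvA 2 false n_max ((List.replicate (n_max + 1).toNat (0 : Int)).set 0 1)
      = pvStepB 2 (n_max + 1) ((List.replicate (n_max + 1).toNat (0 : Int)).set 0 1) := by
    have h := pv_step_eq 2 (by norm_num) false n_max h0
      ((List.replicate (n_max + 1).toNat (0 : Int)).set 0 1) hlen1
    norm_num at h
    exact h
  have hlen2 : (pvStepB 2 (n_max + 1) ((List.replicate (n_max + 1).toNat (0 : Int)).set 0 1)).length
      = (n_max + 1).toNat := by rw [pv_stepB_length, hlen1]
  have h3 : pvMulInvA 3 true n_max (pvStepB 2 (n_max + 1) ((List.replicate (n_max + 1).toNat (0 : Int)).set 0 1))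
      = pvStepB 3 (n_max + 1) (pvStepB 2 (n_max + 1) ((List.replicate (n_max + 1).toNat (0 : Int)).set 0 1)) := by
    have h := pv_step_eq 3 (by norm_num) true n_max h0
      (pvStepB 2 (n_max + 1) ((List.replicate (n_max + 1).toNat (0 : Int)).set 0 1)) hlen2
    norm_num at h
    exact h
  have hlen3 : (pvStepB 3 (n_max + 1) (pvStepB 2 (n_max + 1) ((List.replicate (n_max + 1).toNat (0 : Int)).set 0 1))).length
      = (n_max + 1).toNat := by rw [pv_stepB_length, hlen2]
  have h4 : pvMulInvA 4 true n_max (pvStepB 3 (n_max + 1) (pvStepB 2 (n_max + 1) ((List.replicate (n_max + 1).toNat (0 : Int)).set 0 1)))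
      = pvStepB 4 (n_max + 1) (pvStepB 3 (n_max + 1) (pvStepB 2 (n_max + 1) ((List.replicate (n_max + 1).toNat (0 : Int)).set 0 1))) := by
    have h := pv_step_eq 4 (by norm_num) true n_max h0
      (pvStepB 3 (n_max + 1) (pvStepB 2 (n_max + 1) ((List.replicate (n_max + 1).toNat (0 : Int)).set 0 1))) hlen3
    norm_num at h
    exact h
  have hA : molien_su2_series n_max
      = (PySem.List.pyRange 0 (n_max + 1) 1).foldl
          (fun M i =>
            if 6 ≤ i then
              (M.modify i.toNat (· + (pvMulInvA 4 true n_max (pvMulInvA 3 true n_max (pvMulInvA 2 false n_max ((List.replicate (n_max + 1).toNat (0 : Int)).set 0 1)))).getD i.toNat 0)).modify i.toNat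
                (· + (pvMulInvA 4 true n_max (pvMulInvA 3 true n_max (pvMulInvA 2 false n_max ((List.replicate (n_max + 1).toNat (0 : Int)).set 0 1)))).getD (i - 6).toNat 0)
            else M.modify i.toNat (· + (pvMulInvA 4 true n_max (pvMulInvA 3 true n_max (pvMulInvA 2 false n_max ((List.replicate (n_max + 1).toNat (0 : Int)).set 0 1)))).getD i.toNat 0))
          (List.replicate (n_max + 1).toNat 0) := rfl
  have hB : molien_su2_series_alt n_max
      = (PySem.List.pyRange 0 (n_max + 1) 1).map
          (fun i => (pvStepB 4 (n_max + 1) (pvStepB 3 (n_max + 1) (pvStepB 2 (n_max + 1) ((List.replicate (n_max + 1).toNat (0 : Int)).set 0 1)))).getD i.toNat 0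
            + if 6 ≤ i then (pvStepB 4 (n_max + 1) (pvStepB 3 (n_max + 1) (pvStepB 2 (n_max + 1) ((List.replicate (n_max + 1).toNat (0 : Int)).set 0 1)))).getD (i - 6).toNat 0 else 0) := rfl
  rw [hA, hB, h2, h3, h4]
  exact pv_final_eq n_max h0
    (pvStepB 4 (n_max + 1) (pvStepB 3 (n_max + 1) (pvStepB 2 (n_max + 1) ((List.replicate (n_max + 1).toNat (0 : Int)).set 0 1))))

-- ===== VERDICT (by name: the statement is the Claim_ definition above) =====
theorem molien_su2_series_spec : Claim_equal_molien_su2_series := by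
  intro n_max _ hpre
  unfold Spec_molien_su2_series
  exact pv_main n_max hpre
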